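-- pv_equiv track=rewrite | github.com/LisandroMoya23/Teor-a-de-la-Informacion | Decodificador/TDF/Reed-Solomon-Decodificación A3.py | desentrelazar_codigos_original
-- ===== SOURCE A (Python) =====
-- def desentrelazar_codigos_original(datos_entrelazados, num_palabras, n=15):
--     """
--     Invierte el entrelazado ORIGINAL que lee columna por columna.
--
--     Formato original:
--     - Lee columna 0 de palabra 0, 1, 2, ..., M-1
--     - Luego columna 1 de palabra 0, 1, 2, ..., M-1
--     - etc.
--
--     Entrada: lista plana [col0_w0, col0_w1, ..., col0_wM, col1_w0, ...]
--     Salida: matriz [num_palabras x n] con las palabras RS originales.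
--     """
--     palabras = [[0]*n for _ in range(num_palabras)]
--     idx = 0
--
--     # Recorremos columnas primero, luego filas
--     for j in range(n):              # columnas 0..14
--         for i in range(num_palabras):  # palabras 0..M-1
--             if idx < len(datos_entrelazados):
--                 palabras[i][j] = datos_entrelazados[idx]
--                 idx += 1
--
--     return palabras
-- ===== SOURCE B (Python) =====
-- def desentrelazar_codigos_original(datos_entrelazados, num_palabras, n=15):
--     """Pad/truncate the flat stream to the exact matrix size, then recover each
--     word as a stride slice: word i is every num_palabras-th symbol starting at i."""
--     total = max(num_palabras, 0) * max(n, 0)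
--     padded = (datos_entrelazados + [0] * total)[:total]
--     return [padded[i::num_palabras] for i in range(num_palabras)]
-- ===== Notes on version B (the rewrite author's own statement) =====
-- stated objective: simpler
-- what changed: Replaces A's preallocated zero matrix mutated cell-by-cell under a running flat index in column-major nested loops by two staged passes: pad/truncate the flat stream to exactly num_palabras*n symbols, then recover each word as one stride slice padded[i::num_palabras].
import Mathlib
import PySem

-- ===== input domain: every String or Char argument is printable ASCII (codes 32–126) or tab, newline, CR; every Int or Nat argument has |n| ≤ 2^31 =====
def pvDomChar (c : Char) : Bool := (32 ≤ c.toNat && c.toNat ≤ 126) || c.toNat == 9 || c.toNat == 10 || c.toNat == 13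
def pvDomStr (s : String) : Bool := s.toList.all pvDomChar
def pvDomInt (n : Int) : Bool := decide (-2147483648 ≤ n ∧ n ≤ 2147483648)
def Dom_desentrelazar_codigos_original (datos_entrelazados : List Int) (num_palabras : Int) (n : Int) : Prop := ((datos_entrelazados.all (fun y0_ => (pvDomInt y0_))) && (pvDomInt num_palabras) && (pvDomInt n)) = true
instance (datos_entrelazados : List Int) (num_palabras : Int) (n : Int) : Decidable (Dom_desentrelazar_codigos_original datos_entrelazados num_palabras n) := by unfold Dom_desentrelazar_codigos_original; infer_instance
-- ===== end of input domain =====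

-- B replaces A's cell-by-cell mutation of a preallocated matrix under a running flat index
-- by two staged passes: pad/truncate the stream to the exact matrix size, then recover each
-- word as one stride slice padded[i::num_palabras] (objective: simpler).

-- ===== PORT A =====
-- inner loop body: 'if idx < len(datos_entrelazados): palabras[i][j] = datos_entrelazados[idx]; idx += 1'
-- (palabras[i][j] = v ported with pySetD/pyGetD and datos[idx] with pyGetD; i, j and idx are
--  always in range where these fire, so this is exact)
def pvStepI (datos_entrelazados : List Int) (j : Int)
    (st : List (List Int) × Int) (i : Int) : List (List Int) × Int :=
  if st.2 < (datos_entrelazados.length : Int) then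
    (PySem.List.pySetD st.1 i
       (PySem.List.pySetD (PySem.List.pyGetD st.1 i []) j
          (PySem.List.pyGetD datos_entrelazados st.2 0)),
     st.2 + 1)
  else st

-- 'for i in range(num_palabras): …'
def pvStepJ (datos_entrelazados : List Int) (num_palabras : Int)
    (st : List (List Int) × Int) (j : Int) : List (List Int) × Int :=
  (PySem.List.pyRange 0 num_palabras 1).foldl (pvStepI datos_entrelazados j) st

def desentrelazar_codigos_original (datos_entrelazados : List Int) (num_palabras : Int) (n : Int) : List (List Int) :=
  -- palabras = [[0]*n for _ in range(num_palabras)]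
  let palabras : List (List Int) :=
    (PySem.List.pyRange 0 num_palabras 1).map (fun _ => PySem.List.pyRepeat [(0 : Int)] n)
  -- for j in range(n): for i in range(num_palabras): …   with idx starting at 0
  ((PySem.List.pyRange 0 n 1).foldl (pvStepJ datos_entrelazados num_palabras)
      (palabras, (0 : Int))).1

-- ===== PORT B =====
-- total = max(num_palabras, 0) * max(n, 0); padded = (datos_entrelazados + [0]*total)[:total];
-- [padded[i::num_palabras] for i in range(num_palabras)].  The stride slice padded[i::num_palabras]
-- is PySem.List.slice?; inside range(num_palabras) the step is positive, so it is always 'some'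
-- and '.getD []' only eliminates the Option.
def desentrelazar_codigos_original_alt (datos_entrelazados : List Int) (num_palabras : Int) (n : Int) : List (List Int) :=
  let total : Int := max num_palabras 0 * max n 0
  let padded : List Int :=
    PySem.List.slice (datos_entrelazados ++ PySem.List.pyRepeat [(0 : Int)] total) none (some total)
  (PySem.List.pyRange 0 num_palabras 1).map (fun i =>
    (PySem.List.slice? padded (some i) none num_palabras).getD [])

-- ===== PRECONDITION & SPEC =====
def Spec_desentrelazar_codigos_original (datos_entrelazados : List Int) (num_palabras : Int) (n : Int) (out : List (List Int)) : Prop := out = desentrelazar_codigos_original_alt datos_entrelazados num_palabras n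
instance (datos_entrelazados : List Int) (num_palabras : Int) (n : Int) (out : List (List Int)) : Decidable (Spec_desentrelazar_codigos_original datos_entrelazados num_palabras n out) := by unfold Spec_desentrelazar_codigos_original; infer_instance

-- ===== CLAIM (what is proved, stated in full; the proofs are below) =====
def Claim_equal_desentrelazar_codigos_original : Prop := ∀ (datos_entrelazados : List Int) (num_palabras : Int) (n : Int), Dom_desentrelazar_codigos_original datos_entrelazados num_palabras n → Spec_desentrelazar_codigos_original datos_entrelazados num_palabras n (desentrelazar_codigos_original datos_entrelazados num_palabras n)

-- ===== LEMMAS AND PROOFS =====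

-- the value both programs put in cell (row i, column j)
def pvG (datos : List Int) (M j i : Int) : Int :=
  if j * M + i < (datos.length : Int) then PySem.List.pyGetD datos (j * M + i) 0 else 0

-- the common row-major matrix of pvG cells both sides are reduced to
def pvMat (datos : List Int) (M n : Int) : List (List Int) :=
  (PySem.List.pyRange 0 M 1).map (fun i =>
    (PySem.List.pyRange 0 n 1).map (fun j => pvG datos M j i))

-- ---------- A-side: the nested fold computes pvMat ----------

-- A's matrix after processing all columns < c, and within column c the rows < a;
-- its flat index there is min (c*M + a) len
def pvMid (datos : List Int) (M n c a : Int) : List (List Int) :=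
  (PySem.List.pyRange 0 M 1).map (fun i =>
    (PySem.List.pyRange 0 n 1).map (fun j =>
      if j < c ∨ (j = c ∧ i < a) then pvG datos M j i else 0))

theorem pvSetD_eq_set {α : Type} (xs : List α) (i : Int) (v : α)
    (h0 : 0 ≤ i) (h : i < xs.length) :
    PySem.List.pySetD xs i v = xs.set i.toNat v := by
  simp only [PySem.List.pySetD, PySem.List.pySet?, PySem.List.pyIdx?, if_pos h0, if_pos h,
    Option.map_some, Option.getD_some]

theorem pvSet_map_pyRange {α : Type} (f : Int → α) (b c : Int) (v : α)
    (h0 : 0 ≤ c) :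
    ((PySem.List.pyRange 0 b 1).map f).set c.toNat v
      = (PySem.List.pyRange 0 b 1).map (fun x => if x = c then v else f x) := by
  apply List.ext_getElem
  · simp
  · intro k h1 h2
    simp only [List.length_set, List.length_map, PySem.List.length_pyRange_one] at h1
    rw [List.getElem_set, List.getElem_map, List.getElem_map,
      PySem.List.getElem_pyRange_one]
    split_ifs <;> first | rfl | omega

-- one pass of A's inner loop advances the 'rows done in column c' counter by one
theorem pvStep_eq (datos : List Int) (M n c a : Int)
    (hc : 0 ≤ c) (hcn : c < n) (h0 : 0 ≤ a) (ha : a < M) :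
    pvStepI datos c (pvMid datos M n c a, min (c * M + a) (datos.length : Int)) a
      = (pvMid datos M n c (a + 1), min (c * M + (a + 1)) (datos.length : Int)) := by
  have hca : 0 ≤ c * M + a := by
    have : 0 ≤ c * M := mul_nonneg hc (by omega)
    omega
  have hLen : (pvMid datos M n c a).length = M.toNat := by
    simp [pvMid, PySem.List.length_pyRange_one]
  by_cases hlt : c * M + a < (datos.length : Int)
  · have hmin : min (c * M + a) (datos.length : Int) = c * M + a := by omega
    have hrow : PySem.List.pyGetD (pvMid datos M n c a) a []
        = (PySem.List.pyRange 0 n 1).map (fun j => if j < c then pvG datos M j a else 0) := by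
      rw [PySem.List.pyGetD_eq_getElem _ _ h0 (by omega)]
      simp only [pvMid, List.getElem_map, PySem.List.getElem_pyRange_one]
      have : (0 : Int) + (a.toNat : Int) = a := by omega
      rw [this]
      apply List.map_congr_left
      intro j _
      by_cases hj : j = c <;> simp [hj]
    simp only [pvStepI, hmin, if_pos hlt, hrow, Prod.mk.injEq]
    refine ⟨?_, ?_⟩
    · rw [pvSetD_eq_set _ c _ hc (by simp [PySem.List.length_pyRange_one]; omega),
        pvSet_map_pyRange _ _ _ _ hc,
        pvSetD_eq_set _ a _ h0 (by omega)]
      unfold pvMid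
      rw [pvSet_map_pyRange _ _ _ _ h0]
      apply List.map_congr_left
      intro i _
      by_cases hi : i = a
      · simp only [hi, if_pos]
        apply List.map_congr_left
        intro j _
        by_cases hj : j = c
        · have : pvG datos M c a = PySem.List.pyGetD datos (c * M + a) 0 := by
            simp [pvG, if_pos hlt]
          simp [hj, this]
        · simp [hj]
      · have hiff : (i < a) ↔ (i < a + 1) := by omega
        simp only [if_neg hi]
        apply List.map_congr_left
        intro j _
        by_cases hj : j = c <;> simp [hj, hiff]
    · omega
  · have hL0 : (0:Int) ≤ datos.length := by positivity
    have hmin : min (c * M + a) (datos.length : Int) = (datos.length : Int) := by omega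
    have hmin' : min (c * M + (a + 1)) (datos.length : Int) = (datos.length : Int) := by omega
    simp only [pvStepI, hmin, hmin', lt_irrefl, if_false, Prod.mk.injEq]
    refine ⟨?_, ?_⟩
    · unfold pvMid
      apply List.map_congr_left
      intro i _
      apply List.map_congr_left
      intro j _
      have hg : pvG datos M c a = 0 := by simp [pvG]; omega
      by_cases hj : j = c
      · by_cases hi : i = a
        · simp [hj, hi, hg]
        · have : (i < a) ↔ (i < a + 1) := by omega
          simp [hj, this]
      · simp [hj]
    · trivial

-- A's inner loop fills the rest of column c with the pvG cell values
theorem pvInner_spec (datos : List Int) (M n c : Int) (hc : 0 ≤ c) (hcn : c < n) (k : Nat) :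
    ∀ a : Int, 0 ≤ a → a + k = M →
    (PySem.List.pyRange a M 1).foldl (pvStepI datos c)
        (pvMid datos M n c a, min (c * M + a) (datos.length : Int))
      = (pvMid datos M n c M, min (c * M + M) (datos.length : Int)) := by
  induction k with
  | zero =>
    intro a h0 hk
    have : a = M := by omega
    subst this
    rw [PySem.List.pyRange_one_eq_nil le_rfl]
    rfl
  | succ k ih =>
    intro a h0 hk
    have ha : a < M := by omega
    rw [PySem.List.pyRange_one_cons ha, List.foldl_cons,
      pvStep_eq datos M n c a hc hcn h0 ha]
    exact ih (a + 1) (by omega) (by omega)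

-- A's outer loop fills the remaining columns with the pvG cell values
theorem pvOuter_spec (datos : List Int) (M n : Int) (hM : 0 < M) (k : Nat) :
    ∀ c : Int, 0 ≤ c → c + k = n →
    (PySem.List.pyRange c n 1).foldl (pvStepJ datos M)
        (pvMid datos M n c 0, min (c * M) (datos.length : Int))
      = (pvMid datos M n n 0, min (n * M) (datos.length : Int)) := by
  induction k with
  | zero =>
    intro c hc hk
    have : c = n := by omega
    subst this
    rw [PySem.List.pyRange_one_eq_nil le_rfl]
    rfl
  | succ k ih =>
    intro c hc hk
    have hcn : c < n := by omega
    rw [PySem.List.pyRange_one_cons hcn, List.foldl_cons]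
    have hstep : pvStepJ datos M (pvMid datos M n c 0, min (c * M) (datos.length : Int)) c
        = (pvMid datos M n (c + 1) 0, min ((c + 1) * M) (datos.length : Int)) := by
      unfold pvStepJ
      have h1 : min (c * M) (datos.length : Int) = min (c * M + 0) (datos.length : Int) := by
        omega
      rw [h1, pvInner_spec datos M n c hc hcn M.toNat 0 le_rfl (by omega)]
      have h2 : c * M + M = (c + 1) * M := by ring
      have h3 : pvMid datos M n c M = pvMid datos M n (c + 1) 0 := by
        unfold pvMid
        apply List.map_congr_left
        intro i hi
        have hi' : 0 ≤ i ∧ i < M := PySem.List.mem_pyRange_one.mp hi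
        apply List.map_congr_left
        intro j _
        have : (j < c ∨ (j = c ∧ i < M)) ↔ (j < c + 1 ∨ (j = c + 1 ∧ i < 0)) := by omega
        simp only [this]
      rw [h2, h3]
    rw [hstep]
    exact ih (c + 1) (by omega) (by omega)

theorem pvFoldl_fixed {α β : Type} (l : List β) (init : α) :
    l.foldl (fun s _ => s) init = init := by
  induction l generalizing init with
  | nil => rfl
  | cons x xs ih => simp [List.foldl, ih]

theorem pvA_eq (datos : List Int) (M n : Int) :
    desentrelazar_codigos_original datos M n = pvMat datos M n := by
  unfold desentrelazar_codigos_original pvMat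
  by_cases hM : M ≤ 0
  · have hnil : PySem.List.pyRange 0 M 1 = [] := PySem.List.pyRange_one_eq_nil hM
    have hJ : pvStepJ datos M = fun st _ => st := by
      funext st j
      simp [pvStepJ, hnil]
    simp only [hnil, List.map_nil, hJ, pvFoldl_fixed]
  · have hM : 0 < M := by omega
    have hrep : ((PySem.List.pyRange 0 M 1).map
          (fun _ => PySem.List.pyRepeat [(0 : Int)] n))
        = pvMid datos M n 0 0 := by
      unfold pvMid
      apply List.map_congr_left
      intro i hi
      obtain ⟨hi0, -⟩ := PySem.List.mem_pyRange_one.mp hi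
      rw [PySem.List.pyRepeat_singleton]
      have : (PySem.List.pyRange 0 n 1).map
            (fun j => if j < 0 ∨ (j = 0 ∧ i < 0) then pvG datos M j i else 0)
          = (PySem.List.pyRange 0 n 1).map (fun _ => (0 : Int)) := by
        apply List.map_congr_left
        intro j hj
        obtain ⟨hj0, -⟩ := PySem.List.mem_pyRange_one.mp hj
        have : ¬ (j < 0 ∨ (j = 0 ∧ i < 0)) := by omega
        rw [if_neg this]
      rw [this, List.map_const', PySem.List.length_pyRange_one]
      norm_num
    rw [hrep]
    by_cases hn : n ≤ 0
    · rw [PySem.List.pyRange_one_eq_nil hn]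
      unfold pvMid
      simp [PySem.List.pyRange_one_eq_nil hn]
    · have hn' : 0 < n := by omega
      have hfold := pvOuter_spec datos M n hM n.toNat 0 le_rfl (by omega)
      have h0 : min ((0 : Int) * M) (datos.length : Int) = 0 := by
        have : (0:Int) ≤ datos.length := by positivity
        omega
      rw [h0] at hfold
      simp only [hfold]
      unfold pvMid
      apply List.map_congr_left
      intro i _
      apply List.map_congr_left
      intro j hj
      obtain ⟨-, hjn⟩ := PySem.List.mem_pyRange_one.mp hj
      have : (j < n ∨ (j = n ∧ i < 0)) := by omega
      rw [if_pos this]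

-- ---------- B-side: the stride slices compute pvMat ----------

-- slice? with a nonnegative start and positive step, in explicit filterMap form
theorem pvSliceQ_pos (xs : List Int) (i m : Int) (h0 : 0 ≤ i) (hm : 0 < m) :
    PySem.List.slice? xs (some i) none m
      = some (List.filterMap
          (fun k : Nat => xs[(min i (xs.length : Int) + m * (k : Int)).toNat]?)
          (List.range (if min i (xs.length : Int) < (xs.length : Int)
            then (((xs.length : Int) - min i (xs.length : Int) + m - 1) / m).toNat else 0))) := by
  have h1 : ¬ m < 0 := by omega
  have h2 : ¬ m = 0 := by omega
  have h3 : ¬ i < 0 := by omega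
  simp only [PySem.List.slice?, PySem.List.sliceIndices, h1, h2, h3, if_false, if_pos hm]

theorem pvFilterMap_eq_map {α β : Type} (l : List α) (f : α → Option β) (g : α → β)
    (h : ∀ a ∈ l, f a = some (g a)) : l.filterMap f = l.map g := by
  induction l with
  | nil => rfl
  | cons x xs ih =>
    rw [List.filterMap_cons, h x List.mem_cons_self, List.map_cons,
      ih (fun a ha => h a (List.mem_cons_of_mem _ ha))]

theorem pvB_eq (datos : List Int) (M n : Int) :
    desentrelazar_codigos_original_alt datos M n = pvMat datos M n := by
  unfold desentrelazar_codigos_original_alt pvMat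
  apply List.map_congr_left
  intro i hi
  obtain ⟨hi0, hiM⟩ := PySem.List.mem_pyRange_one.mp hi
  have hM : 0 < M := by omega
  have htot0 : (0 : Int) ≤ max M 0 * max n 0 := mul_nonneg (by omega) (by omega)
  -- padded = (datos ++ replicate T 0).take T with T = (max M 0 * max n 0).toNat
  rw [PySem.List.pyRepeat_singleton, PySem.List.slice_to _ htot0]
  set T : Nat := (max M 0 * max n 0).toNat with hT
  set padded : List Int := (datos ++ List.replicate T 0).take T with hpad
  have hplen : padded.length = T := by
    simp [hpad, List.length_take, List.length_append]
  by_cases hn : n ≤ 0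
  · -- no columns: T = 0, padded = [], every stride slice is []
    have hT0 : T = 0 := by
      have h1 : max n 0 = 0 := by omega
      simp [hT, h1]
    have hpnil : padded = [] := by simp [hpad, hT0]
    rw [hpnil, PySem.List.pyRange_one_eq_nil hn, List.map_nil,
      pvSliceQ_pos [] i M hi0 hM]
    simp
  · have hn' : 0 < n := by omega
    have hTval : (T : Int) = M * n := by
      rw [hT, Int.toNat_of_nonneg htot0]
      congr 1 <;> omega
    have hiT : i < (T : Int) := by
      rw [hTval]
      have : M * 1 ≤ M * n := by
        apply mul_le_mul_of_nonneg_left (by omega) (by omega)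
      omega
    have hplen' : ((padded.length : Int)) = (T : Int) := by exact_mod_cast hplen
    have hmin : min i ((padded.length : Int)) = i := by omega
    rw [pvSliceQ_pos padded i M hi0 hM, Option.getD_some, hmin, hplen', hTval,
      if_pos (by omega : i < M * n)]
    -- the count is exactly n
    have hcount : ((M * n - i + M - 1) / M).toNat = n.toNat := by
      have hr : M * n - i + M - 1 = (M - 1 - i) + M * n := by ring
      rw [hr, Int.add_mul_ediv_left _ _ (by omega : M ≠ 0),
        Int.ediv_eq_zero_of_lt (by omega) (by omega)]
      omega
    rw [hcount]
    -- each probed index is in range: filterMap collapses to a map of cell values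
    have hsome : ∀ k ∈ List.range n.toNat,
        padded[(i + M * (k : Int)).toNat]?
          = some (if i + M * (k : Int) < (datos.length : Int)
              then PySem.List.pyGetD datos (i + M * (k : Int)) 0 else 0) := by
      intro k hk
      have hk' : (k : Int) < n := by
        have := List.mem_range.mp hk
        omega
      have hp0 : 0 ≤ i + M * (k : Int) := by
        have : 0 ≤ M * (k : Int) := mul_nonneg (by omega) (by omega)
        omega
      have hpT : i + M * (k : Int) < (T : Int) := by
        rw [hTval]
        have : M * ((k : Int) + 1) ≤ M * n := by
          apply mul_le_mul_of_nonneg_left (by omega) (by omega)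
        nlinarith
      set p : Nat := (i + M * (k : Int)).toNat with hpdef
      have hpInt : (p : Int) = i + M * (k : Int) := Int.toNat_of_nonneg hp0
      have hpT' : p < T := by omega
      have hget : padded[p]? = (datos ++ List.replicate T 0)[p]? := by
        rw [hpad, List.getElem?_take]
        simp [hpT']
      by_cases hd : i + M * (k : Int) < (datos.length : Int)
      · have hpd : p < datos.length := by omega
        rw [hget, List.getElem?_append_left hpd, if_pos hd,
          PySem.List.pyGetD_eq_getElem datos _ (by omega) (by omega)]
        rw [List.getElem?_eq_getElem hpd]
      · have hpd : datos.length ≤ p := by omega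
        rw [hget, List.getElem?_append_right hpd, if_neg hd]
        have : p - datos.length < T := by omega
        simp [this]
    rw [pvFilterMap_eq_map _ _ _ hsome, PySem.List.pyRange_one 0 n, List.map_map]
    have hn0 : ((n - 0).toNat) = n.toNat := by omega
    rw [hn0]
    apply List.map_congr_left
    intro k _
    simp only [Function.comp]
    have harg : (k : Int) * M + i = i + M * (k : Int) := by ring
    simp only [pvG, zero_add]
    rw [harg]

theorem pvMain (datos : List Int) (M n : Int) :
    desentrelazar_codigos_original datos M n = desentrelazar_codigos_original_alt datos M n := by
  rw [pvA_eq, pvB_eq]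

-- ===== VERDICT (by name: the statement is the Claim_ definition above) =====
theorem desentrelazar_codigos_original_spec : Claim_equal_desentrelazar_codigos_original := by
  intro datos_entrelazados num_palabras n _
  unfold Spec_desentrelazar_codigos_original
  exact pvMain datos_entrelazados num_palabras n
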